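-- pv_equiv track=rewrite | github.com/Clube-do-Enrolado/Compiladores | Lexical/afds.py | afd_operator
-- ===== SOURCE A (Python) =====
-- def afd_operator(lexem):
--
--     # special = ["+","-","*","/","=","==","!=","+=","-=","*=","/=","<",">","<=",">="]
--
--     transition_table = {
--             0: {'!':2, '+':1, '-':1, '*':1, '/':1, '=':1, '<':1, '>':1 },
--             1: {'=': 3},
--             2: {'=': 3},
--             3: {}
--             }
--
--     current_state = 0
--     ESTADOS_FINAIS = [1,3] # Estados finais possíveis
--
--
--     for char in lexem:
--         # Se o caractere lido não for válido entre as opções dadas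
--         if char not in transition_table[current_state].keys():
--             # O lexema não é válido.
--             return (False,None)
--
--         else: # Muda de estado.
--             current_state = transition_table[current_state][char]
--
--     # Está no estado final e não existem mais caracteres para leitura.
--     if current_state in ESTADOS_FINAIS:
--         return (True,lexem)
--     else:
--         return (False,None)
-- ===== SOURCE B (Python) =====
-- _VALID = frozenset(["+", "-", "*", "/", "=", "<", ">",
--                     "==", "!=", "+=", "-=", "*=", "/=", "<=", ">="])
--
-- def afd_operator(lexem):
--     return (True, lexem) if lexem in _VALID else (False, None)
-- ===== Notes on version B (the rewrite author's own statement) =====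
-- stated objective: simpler
-- what changed: Replaced the character-by-character DFA traversal (transition table + state loop) by a single whole-string membership test against the precomputed set of the 15 operator lexemes the DFA accepts.
import Mathlib
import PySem

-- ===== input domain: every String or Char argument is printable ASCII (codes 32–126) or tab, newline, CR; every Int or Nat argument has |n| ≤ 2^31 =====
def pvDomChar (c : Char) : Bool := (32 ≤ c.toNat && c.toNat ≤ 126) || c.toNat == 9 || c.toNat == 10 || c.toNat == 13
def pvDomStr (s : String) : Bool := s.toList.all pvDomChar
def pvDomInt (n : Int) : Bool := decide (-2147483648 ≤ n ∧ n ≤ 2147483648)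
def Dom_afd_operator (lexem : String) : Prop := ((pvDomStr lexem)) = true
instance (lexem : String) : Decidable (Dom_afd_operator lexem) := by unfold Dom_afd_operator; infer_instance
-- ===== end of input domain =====

set_option maxHeartbeats 1000000


-- B replaces the character-by-character DFA traversal by one membership test in the
-- precomputed list of the 15 operator lexemes the DFA accepts (objective: simpler).

-- ===== PORT A =====
-- transition_table[state].get(char): none = char not among the keys of that state's dict
def afdTable (state : Int) (c : Char) : Option Int :=
  if state = 0 then
    if c = '!' then some 2
    else if c = '+' then some 1
    else if c = '-' then some 1
    else if c = '*' then some 1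
    else if c = '/' then some 1
    else if c = '=' then some 1
    else if c = '<' then some 1
    else if c = '>' then some 1
    else none
  else if state = 1 then (if c = '=' then some 3 else none)
  else if state = 2 then (if c = '=' then some 3 else none)
  else none

-- the 'for char in lexem' loop with early return (False, None), then the final-state test
def afdLoop (lexem : String) (state : Int) : List Char → Bool × Option String
  | [] => if ([1, 3] : List Int).contains state then (true, some lexem) else (false, none)
  | c :: rest =>
    match afdTable state c with
    | none => (false, none)
    | some s' => afdLoop lexem s' rest

def afd_operator (lexem : String) : Bool × Option String :=
  afdLoop lexem 0 lexem.toList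

-- ===== PORT B =====
-- _VALID: the precomputed set of accepted operator lexemes
def pvValidOps : List String :=
  ["+", "-", "*", "/", "=", "<", ">", "==", "!=", "+=", "-=", "*=", "/=", "<=", ">="]

def afd_operator_alt (lexem : String) : Bool × Option String :=
  if pvValidOps.contains lexem then (true, some lexem) else (false, none)

-- ===== PRECONDITION & SPEC =====
def Spec_afd_operator (lexem : String) (out : Bool × Option String) : Prop := out = afd_operator_alt lexem
instance (lexem : String) (out : Bool × Option String) : Decidable (Spec_afd_operator lexem out) := by unfold Spec_afd_operator; infer_instance

-- ===== CLAIM (what is proved, stated in full; the proofs are below) =====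
def Claim_equal_afd_operator : Prop := ∀ (lexem : String), Dom_afd_operator lexem → Spec_afd_operator lexem (afd_operator lexem)

-- ===== LEMMAS AND PROOFS =====

theorem eq_iff_toList (s t : String) : s = t ↔ s.toList = t.toList :=
  ⟨congrArg _, fun h => by
    have h2 := congrArg String.ofList h
    rwa [String.ofList_toList, String.ofList_toList] at h2⟩

-- B's membership test, rewritten on the character-list side
theorem alt_eq (lexem : String) :
    afd_operator_alt lexem =
      (if lexem.toList ∈ (pvValidOps.map String.toList) then (true, some lexem) else (false, none)) := by
  unfold afd_operator_alt
  by_cases h : lexem.toList ∈ pvValidOps.map String.toList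
  · rw [if_pos h, if_pos]
    rw [List.contains_iff_exists_mem_beq]
    obtain ⟨t, ht, hl⟩ := List.mem_map.mp h
    exact ⟨t, ht, by rw [beq_iff_eq, eq_iff_toList, hl]⟩
  · rw [if_neg h, if_neg]
    intro hc
    obtain ⟨t, ht, hb⟩ := List.contains_iff_exists_mem_beq.mp hc
    exact h (List.mem_map.mpr ⟨t, ht, ((eq_iff_toList lexem t).mp (beq_iff_eq.mp hb)).symm⟩)

theorem valid_toLists :
    pvValidOps.map String.toList =
      [['+'], ['-'], ['*'], ['/'], ['='], ['<'], ['>'], ['=','='], ['!','='],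
       ['+','='], ['-','='], ['*','='], ['/','='], ['<','='], ['>','=']] := by
  decide

-- from state 0 the table yields no state or state 1 or state 2
theorem table0_cases (c : Char) :
    afdTable 0 c = none ∨ afdTable 0 c = some 1 ∨ afdTable 0 c = some 2 := by
  simp only [afdTable]
  split_ifs <;> simp

-- A's loop from the start state computes exactly the membership test on the char list
theorem loop_eq (s : String) (l : List Char) :
    afdLoop s 0 l =
      (if l ∈ [['+'], ['-'], ['*'], ['/'], ['='], ['<'], ['>'], ['=','='], ['!','='],
        ['+','='], ['-','='], ['*','='], ['/','='], ['<','='], ['>','=']]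
       then (true, some s) else (false, none)) := by
  match l with
  | [] => simp [afdLoop]
  | [c] =>
    by_cases h1 : c = '!'; · subst h1; simp [afdLoop, afdTable]
    by_cases h2 : c = '+'; · subst h2; simp [afdLoop, afdTable]
    by_cases h3 : c = '-'; · subst h3; simp [afdLoop, afdTable]
    by_cases h4 : c = '*'; · subst h4; simp [afdLoop, afdTable]
    by_cases h5 : c = '/'; · subst h5; simp [afdLoop, afdTable]
    by_cases h6 : c = '='; · subst h6; simp [afdLoop, afdTable]
    by_cases h7 : c = '<'; · subst h7; simp [afdLoop, afdTable]
    by_cases h8 : c = '>'; · subst h8; simp [afdLoop, afdTable]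
    simp [afdLoop, afdTable, h1, h2, h3, h4, h5, h6, h7, h8]
  | [c, d] =>
    by_cases hd : d = '='
    · subst hd
      by_cases h1 : c = '!'; · subst h1; simp [afdLoop, afdTable]
      by_cases h2 : c = '+'; · subst h2; simp [afdLoop, afdTable]
      by_cases h3 : c = '-'; · subst h3; simp [afdLoop, afdTable]
      by_cases h4 : c = '*'; · subst h4; simp [afdLoop, afdTable]
      by_cases h5 : c = '/'; · subst h5; simp [afdLoop, afdTable]
      by_cases h6 : c = '='; · subst h6; simp [afdLoop, afdTable]
      by_cases h7 : c = '<'; · subst h7; simp [afdLoop, afdTable]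
      by_cases h8 : c = '>'; · subst h8; simp [afdLoop, afdTable]
      simp [afdLoop, afdTable, h1, h2, h3, h4, h5, h6, h7, h8]
    · have hmem : ([c, d] : List Char) ∉
          [['+'], ['-'], ['*'], ['/'], ['='], ['<'], ['>'], ['=','='], ['!','='],
           ['+','='], ['-','='], ['*','='], ['/','='], ['<','='], ['>','=']] := by
        simp [hd]
      rw [if_neg hmem]
      rcases table0_cases c with h | h | h
      · simp [afdLoop, h]
      · simp only [afdLoop, h]; simp [afdTable, hd]
      · simp only [afdLoop, h]; simp [afdTable, hd]
  | c :: d :: e :: t =>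
    have hmem : (c :: d :: e :: t) ∉
        [['+'], ['-'], ['*'], ['/'], ['='], ['<'], ['>'], ['=','='], ['!','='],
         ['+','='], ['-','='], ['*','='], ['/','='], ['<','='], ['>','=']] := by
      simp
    rw [if_neg hmem]
    rcases table0_cases c with h | h | h
    · simp [afdLoop, h]
    all_goals
      simp only [afdLoop, h]
      by_cases hd : d = '='
      · subst hd; simp [afdTable]
      · simp [afdTable, hd]

-- ===== VERDICT (by name: the statement is the Claim_ definition above) =====
theorem afd_operator_spec : Claim_equal_afd_operator := by
  intro lexem _
  unfold Spec_afd_operator afd_operator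
  rw [alt_eq, valid_toLists, loop_eq]
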